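-- pv_equiv track=rewrite | github.com/owencooke/leetcode | misc/codesignal-unique-strings.py | solution
-- ===== SOURCE A (Python) =====
-- def solution(s):
--     unique = 0
--     for i in range(1, len(s)-1):
--         a = s[:i]
--         sub = s[i:]
--         for j in range(1, len(sub)):
--             b = sub[:j]
--             c = sub[j:]
--             if (a+b)!=(b+c) and (b+c)!=(c+a) and (a+b)!=(c+a):
--                 unique += 1
--     return unique
-- ===== SOURCE B (Python) =====
-- def solution(s):
--     n = len(s)
--     unique = 0
--     for i in range(1, n - 1):
--         # a = s[:i]; for each second cut j, the three concatenations can only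
--         # collide when their lengths match, which pins j to at most three values.
--         bad = set()
--         if n - 2 * i >= 1 and s[:n - i] == s[i:]:
--             bad.add(n - 2 * i)                    # a+b == b+c needs len(a)==len(c)
--         if 2 * i <= n - 1 and s[i:] == s[2 * i:] + s[:i]:
--             bad.add(i)                            # b+c == c+a needs len(a)==len(b)
--         if (n - i) % 2 == 0:
--             p = (n + i) // 2
--             if s[:p] == s[p:] + s[:i]:
--                 bad.add((n - i) // 2)             # a+b == c+a needs len(b)==len(c)
--         unique += (n - i - 1) - len(bad)
--     return unique
-- ===== Notes on version B (the rewrite author's own statement) =====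
-- stated objective: faster
-- what changed: Instead of enumerating every second cut j and comparing three O(n) concatenations, B notes equal strings need equal lengths, so for each first cut i at most three specific j values can make two rotations collide; it checks only those and counts the rest in closed form.
import Mathlib
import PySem

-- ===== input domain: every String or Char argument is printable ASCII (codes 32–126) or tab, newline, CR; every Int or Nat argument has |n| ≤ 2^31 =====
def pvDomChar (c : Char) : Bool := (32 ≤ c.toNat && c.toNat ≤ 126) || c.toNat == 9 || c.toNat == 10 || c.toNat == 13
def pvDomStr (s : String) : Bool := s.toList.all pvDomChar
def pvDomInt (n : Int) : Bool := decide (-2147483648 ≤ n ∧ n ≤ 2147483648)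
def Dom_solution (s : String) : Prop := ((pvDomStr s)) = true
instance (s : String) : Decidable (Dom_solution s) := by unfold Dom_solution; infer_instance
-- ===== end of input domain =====

-- B replaces A's inner loop over all second cuts (each comparing three O(n)
-- concatenations) by checking the at most three cut positions whose lengths allow a
-- collision, counting the remaining cuts in closed form.

-- ===== PORT A =====
def solution (s : String) : Int :=
  let l := s.toList
  (PySem.List.pyRange 1 (PySem.Str.len s - 1) 1).foldl (fun unique i =>
    let a := PySem.List.slice l none (some i)
    let sub := PySem.List.slice l (some i) none
    (PySem.List.pyRange 1 (sub.length : Int) 1).foldl (fun unique j =>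
      let b := PySem.List.slice sub none (some j)
      let c := PySem.List.slice sub (some j) none
      if a ++ b ≠ b ++ c ∧ b ++ c ≠ c ++ a ∧ a ++ b ≠ c ++ a then unique + 1
      else unique) unique) 0

-- ===== PORT B =====
def solution_alt (s : String) : Int :=
  let l := s.toList
  let n : Int := PySem.Str.len s
  (PySem.List.pyRange 1 (n - 1) 1).foldl (fun unique i =>
    let bad0 : PySem.Set Int := PySem.Set.empty
    let bad1 := if n - 2*i ≥ 1 ∧ PySem.List.slice l none (some (n - i)) = PySem.List.slice l (some i) none
      then PySem.Set.add bad0 (n - 2*i) else bad0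
    let bad2 := if 2*i ≤ n - 1 ∧ PySem.List.slice l (some i) none = PySem.List.slice l (some (2*i)) none ++ PySem.List.slice l none (some i)
      then PySem.Set.add bad1 i else bad1
    let bad3 := if PySem.Int.mod (n - i) 2 = 0 then
        let p := PySem.Int.floordiv (n + i) 2
        if PySem.List.slice l none (some p) = PySem.List.slice l (some p) none ++ PySem.List.slice l none (some i)
        then PySem.Set.add bad2 (PySem.Int.floordiv (n - i) 2) else bad2
      else bad2
    unique + (n - i - 1 - PySem.Set.len bad3)) 0

-- ===== PRECONDITION & SPEC =====
def Spec_solution (s : String) (out : Int) : Prop := out = solution_alt s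
instance (s : String) (out : Int) : Decidable (Spec_solution s out) := by unfold Spec_solution; infer_instance

-- ===== CLAIM (what is proved, stated in full; the proofs are below) =====
def Claim_equal_solution : Prop := ∀ (s : String), Dom_solution s → Spec_solution s (solution s)

-- ===== LEMMAS AND PROOFS =====

theorem pv_nodup_add {s : PySem.Set Int} {x : Int} (h : s.Nodup) : (PySem.Set.add s x).Nodup := by
  by_cases hx : x ∈ s
  · rwa [PySem.Set.add_of_mem hx]
  · rw [PySem.Set.add_of_not_mem hx]
    simp only [List.nodup_append, List.nodup_singleton, true_and]
    refine ⟨h, ?_⟩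
    intro a ha b hb
    simp only [List.mem_singleton] at hb
    subst hb
    exact fun hax => hx (hax ▸ ha)

theorem pv_countP_mem (r b : List Int) (hr : r.Nodup) (hb : b.Nodup)
    (hsub : ∀ x ∈ b, x ∈ r) :
    r.countP (fun x => decide (x ∈ b)) = b.length := by
  rw [List.countP_eq_length_filter]
  have hperm : (r.filter (fun x => decide (x ∈ b))).Perm b := by
    rw [List.perm_ext_iff_of_nodup (hr.filter _) hb]
    intro a
    simp only [List.mem_filter, decide_eq_true_eq]
    exact ⟨fun ⟨_, h2⟩ => h2, fun h => ⟨hsub a h, h⟩⟩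
  exact hperm.length_eq

-- a+b = b+c forces len(a) = len(c)
theorem pv_e1_iff (l : List Char) (ti tj : Nat) (h2 : 1 ≤ tj) (h3 : ti + tj + 1 ≤ l.length) :
    l.take (ti + tj) = l.drop ti ↔ (l.length = 2*ti + tj ∧ l.take (l.length - ti) = l.drop ti) := by
  constructor
  · intro h
    have hl := congrArg List.length h
    simp only [List.length_take, List.length_drop] at hl
    have hn : l.length = 2*ti + tj := by omega
    refine ⟨hn, ?_⟩
    have : l.length - ti = ti + tj := by omega
    rwa [this]
  · rintro ⟨hn, h⟩
    have : l.length - ti = ti + tj := by omega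
    rwa [this] at h

-- b+c = c+a forces len(a) = len(b)
theorem pv_e2_iff (l : List Char) (ti tj : Nat) (h3 : ti + tj + 1 ≤ l.length) :
    l.drop ti = l.drop (ti + tj) ++ l.take ti ↔ (tj = ti ∧ l.drop ti = l.drop (2*ti) ++ l.take ti) := by
  constructor
  · intro h
    have hl := congrArg List.length h
    simp only [List.length_drop, List.length_append, List.length_take] at hl
    have hji : tj = ti := by omega
    refine ⟨hji, ?_⟩
    have h2 : ti + tj = 2*ti := by omega
    rwa [h2] at h
  · rintro ⟨hji, h⟩
    have h2 : ti + tj = 2*ti := by omega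
    rwa [h2]

theorem pv_countP_split (r : List Int) (q : Int → Bool) (B : List Int)
    (hiff : ∀ j ∈ r, q j = !decide (j ∈ B)) :
    r.countP q + r.countP (fun j => decide (j ∈ B)) = r.length := by
  induction r with
  | nil => simp
  | cons x xs ih =>
    have hx := hiff x (by simp)
    have ih' := ih (fun j hj => hiff j (by simp [hj]))
    by_cases hmem : x ∈ B <;> (simp [hx, hmem]; omega)

theorem pv_key (r : List Int) (p : Int → Prop) [DecidablePred p]
    (g1 g2 g3a g3b : Prop) [Decidable g1] [Decidable g2] [Decidable g3a] [Decidable g3b]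
    (x1 x2 x3 len : Int)
    (hr : r.Nodup)
    (hlen : (r.length : Int) = len)
    (hm1 : g1 → x1 ∈ r) (hm2 : g2 → x2 ∈ r) (hm3 : g3a → g3b → x3 ∈ r)
    (hiff : ∀ j ∈ r, p j ↔ ¬((g1 ∧ j = x1) ∨ (g2 ∧ j = x2) ∨ (g3a ∧ g3b ∧ j = x3))) :
    ((r.countP fun j => decide (p j)) : Int) =
      len - PySem.Set.len
        (if g3a then
          (if g3b then
            PySem.Set.add
              (if g2 then
                PySem.Set.add (if g1 then PySem.Set.add PySem.Set.empty x1 else PySem.Set.empty) x2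
               else (if g1 then PySem.Set.add PySem.Set.empty x1 else PySem.Set.empty)) x3
           else
            (if g2 then
                PySem.Set.add (if g1 then PySem.Set.add PySem.Set.empty x1 else PySem.Set.empty) x2
             else (if g1 then PySem.Set.add PySem.Set.empty x1 else PySem.Set.empty)))
         else
          (if g2 then
              PySem.Set.add (if g1 then PySem.Set.add PySem.Set.empty x1 else PySem.Set.empty) x2
           else (if g1 then PySem.Set.add PySem.Set.empty x1 else PySem.Set.empty))) := by
  set B1 : PySem.Set Int := if g1 then PySem.Set.add PySem.Set.empty x1 else PySem.Set.empty with hB1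
  set B2 : PySem.Set Int := if g2 then PySem.Set.add B1 x2 else B1 with hB2
  set B3 : PySem.Set Int := if g3a then (if g3b then PySem.Set.add B2 x3 else B2) else B2 with hB3
  have hch : ∀ x, x ∈ B3 ↔ ((g1 ∧ x = x1) ∨ (g2 ∧ x = x2) ∨ (g3a ∧ g3b ∧ x = x3)) := by
    intro x
    rw [hB3, hB2, hB1]
    by_cases hg1 : g1 <;> by_cases hg2 : g2 <;> by_cases hg3a : g3a <;> by_cases hg3b : g3b <;>
      (simp [hg1, hg2, hg3a, hg3b, PySem.Set.mem_add, PySem.Set.empty_eq]; try tauto)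
  have hnd : B3.Nodup := by
    rw [hB3, hB2, hB1]
    split_ifs <;> (repeat' apply pv_nodup_add) <;> (rw [PySem.Set.empty_eq]; exact List.nodup_nil)
  have hsub : ∀ x ∈ B3, x ∈ r := by
    intro x hx
    rcases (hch x).mp hx with ⟨h, rfl⟩ | ⟨h, rfl⟩ | ⟨h, h', rfl⟩
    · exact hm1 h
    · exact hm2 h
    · exact hm3 h h'
  have hcnt := pv_countP_mem r B3 hr hnd hsub
  have hsplit := pv_countP_split r (fun j => decide (p j)) B3 (by
    intro j hj
    show decide (p j) = !decide (j ∈ B3)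
    have hpq : p j ↔ ¬(j ∈ B3) := (hiff j hj).trans (not_congr (hch j)).symm
    rw [decide_eq_decide.mpr hpq]
    · simp
    · infer_instance)
  rw [PySem.Set.len_eq]
  omega

theorem solution_eq_alt (s : String) : solution s = solution_alt s := by
  unfold solution solution_alt
  simp only [PySem.Str.len_eq]
  apply PySem.List.foldl_congr_mem
  intro u i hi
  rw [PySem.List.mem_pyRange_one] at hi
  obtain ⟨hi1, hi2⟩ := hi
  lift i to Nat using (by omega : (0:Int) ≤ i) with ti
  rw [PySem.List.slice_to_natCast, PySem.List.slice_from_natCast]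
  set L := s.toList with hL
  have hti1 : 1 ≤ ti := by omega
  have hti2 : ti + 2 ≤ L.length := by omega
  rw [PySem.List.foldl_ite_add_one]
  congr 1
  refine pv_key _ _ _ _ _ _
    ((L.length:Int) - 2 * ti) (ti:Int) (PySem.Int.floordiv ((L.length:Int) - ti) 2)
    ((L.length:Int) - ti - 1)
    (PySem.List.nodup_pyRange_one _ _) ?hlen ?hm1 ?hm2 ?hm3 ?hiff
  case hlen =>
    rw [PySem.List.length_pyRange_one]
    simp only [List.length_drop]
    omega
  case hm1 =>
    rintro ⟨hge, -⟩
    rw [PySem.List.mem_pyRange_one]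
    simp only [List.length_drop]
    omega
  case hm2 =>
    rintro ⟨hle, -⟩
    rw [PySem.List.mem_pyRange_one]
    simp only [List.length_drop]
    omega
  case hm3 =>
    intro hpar _
    obtain ⟨k, hk⟩ := (PySem.Int.mod_eq_zero_iff_dvd _ _).mp hpar
    have hfd : PySem.Int.floordiv ((L.length:Int) - ti) 2 = k := by
      rw [PySem.Int.floordiv_eq_iff_of_pos (by norm_num)]
      omega
    rw [PySem.List.mem_pyRange_one, hfd]
    simp only [List.length_drop]
    omega
  case hiff =>
    intro j hj
    rw [PySem.List.mem_pyRange_one] at hj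
    simp only [List.length_drop] at hj
    lift j to Nat using (by omega : (0:Int) ≤ j) with tj
    have htj1 : 1 ≤ tj := by omega
    have htj2 : ti + tj + 1 ≤ L.length := by omega
    rw [PySem.List.slice_to_natCast, PySem.List.slice_from_natCast]
    have hab : L.take ti ++ (L.drop ti).take tj = L.take (ti + tj) := (List.take_add).symm
    have hbc : (L.drop ti).take tj ++ (L.drop ti).drop tj = L.drop ti := List.take_append_drop _ _
    have hdrop : (L.drop ti).drop tj = L.drop (ti + tj) := by
      rw [List.drop_drop, Nat.add_comm]
    rw [hab, hbc, hdrop]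
    have e_take : PySem.List.slice L none (some ((L.length:Int) - ti)) = L.take (L.length - ti) := by
      rw [PySem.List.slice_to _ (by omega)]
      have h' : (((L.length:Int) - ti)).toNat = L.length - ti := by omega
      rw [h']
    have e_drop2 : PySem.List.slice L (some (2 * (ti:Int))) none = L.drop (2 * ti) := by
      rw [PySem.List.slice_from _ (by omega)]
      have h' : ((2 * (ti:Int))).toNat = 2 * ti := by omega
      rw [h']
    have hD1 : (((L.length:Int) - 2 * ti ≥ 1 ∧
          PySem.List.slice L none (some ((L.length:Int) - ti)) = L.drop ti) ∧
          (tj:Int) = (L.length:Int) - 2 * ti) ↔ L.take (ti + tj) = L.drop ti := by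
      rw [pv_e1_iff L ti tj htj1 htj2, e_take]
      constructor
      · rintro ⟨⟨hge, hstr⟩, hx⟩
        exact ⟨by omega, hstr⟩
      · rintro ⟨hn, hstr⟩
        exact ⟨⟨by omega, hstr⟩, by omega⟩
    have hD2 : ((2 * (ti:Int) ≤ (L.length:Int) - 1 ∧
          L.drop ti = PySem.List.slice L (some (2 * (ti:Int))) none ++ L.take ti) ∧
          (tj:Int) = (ti:Int)) ↔ L.drop ti = L.drop (ti + tj) ++ L.take ti := by
      rw [pv_e2_iff L ti tj htj2, e_drop2]
      constructor
      · rintro ⟨⟨hle, hstr⟩, hx⟩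
        exact ⟨by omega, hstr⟩
      · rintro ⟨hn, hstr⟩
        exact ⟨⟨by omega, hstr⟩, by omega⟩
    have hD3 : ((PySem.Int.mod ((L.length:Int) - ti) 2 = 0) ∧
          (PySem.List.slice L none (some (PySem.Int.floordiv ((L.length:Int) + ti) 2)) =
            PySem.List.slice L (some (PySem.Int.floordiv ((L.length:Int) + ti) 2)) none ++ L.take ti) ∧
          (tj:Int) = PySem.Int.floordiv ((L.length:Int) - ti) 2) ↔
          L.take (ti + tj) = L.drop (ti + tj) ++ L.take ti := by
      constructor
      · rintro ⟨hpar, hstr, hx⟩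
        obtain ⟨k, hk⟩ := (PySem.Int.mod_eq_zero_iff_dvd _ _).mp hpar
        have hfd : PySem.Int.floordiv ((L.length:Int) - ti) 2 = k := by
          rw [PySem.Int.floordiv_eq_iff_of_pos (by norm_num)]
          omega
        rw [hfd] at hx
        have hP : PySem.Int.floordiv ((L.length:Int) + ti) 2 = ((ti + tj : Nat) : Int) := by
          rw [PySem.Int.floordiv_eq_iff_of_pos (by norm_num)]
          omega
        rw [hP, PySem.List.slice_to_natCast, PySem.List.slice_from_natCast] at hstr
        exact hstr
      · intro hstr
        have hlen3 : L.length = ti + 2 * tj := by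
          have := congrArg List.length hstr
          simp only [List.length_take, List.length_drop, List.length_append] at this
          omega
        have hpar : PySem.Int.mod ((L.length:Int) - ti) 2 = 0 :=
          (PySem.Int.mod_eq_zero_iff_dvd _ _).mpr ⟨(tj:Int), by omega⟩
        have hP : PySem.Int.floordiv ((L.length:Int) + ti) 2 = ((ti + tj : Nat) : Int) := by
          rw [PySem.Int.floordiv_eq_iff_of_pos (by norm_num)]
          push_cast
          omega
        have hfd : PySem.Int.floordiv ((L.length:Int) - ti) 2 = (tj:Int) := by
          rw [PySem.Int.floordiv_eq_iff_of_pos (by norm_num)]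
          omega
        refine ⟨hpar, ?_, hfd.symm⟩
        rw [hP, PySem.List.slice_to_natCast, PySem.List.slice_from_natCast]
        exact hstr
    rw [not_iff_not.mpr (or_congr hD1 (or_congr hD2 hD3))]
    push Not
    constructor
    · rintro ⟨h1, h2, h3⟩
      exact ⟨h1, h2, h3⟩
    · rintro ⟨h1, h2, h3⟩
      exact ⟨h1, h2, h3⟩

-- ===== VERDICT (by name: the statement is the Claim_ definition above) =====
theorem solution_spec : Claim_equal_solution := by
  intro s _
  unfold Spec_solution
  exact solution_eq_alt s
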